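-- pv_equiv track=rewrite | github.com/IBIdarmajaya/PySS7 | old/stolen_m2ua.py | Searching_For_Multiple_Length
-- ===== SOURCE A (Python) =====
-- def Searching_For_Multiple_Length(parameter_length):
-- 	initial_parameter_length = parameter_length
-- 	for i in range(1,4):
-- 		parameter_length = initial_parameter_length + i
-- 		if parameter_length % 4 == 0:
-- 			multiple_length = parameter_length
-- 			break
-- 	else:
-- 		raise M2UA_Error("padding bytes counting error")
-- 	return multiple_length
--
-- class M2UA_Error(Exception):
--
-- 	def __init__(self, description):
-- 		self.description = description
-- ===== SOURCE B (Python) =====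
-- def Searching_For_Multiple_Length(parameter_length):
-- 	needed = (-parameter_length) % 4
-- 	if needed in (1, 2, 3):
-- 		return parameter_length + needed
-- 	raise M2UA_Error("padding bytes counting error")
--
-- class M2UA_Error(Exception):
--
-- 	def __init__(self, description):
-- 		self.description = description
-- ===== Notes on version B (the rewrite author's own statement) =====
-- stated objective: simpler
-- what changed: Replaces the 1..3 search loop by the closed-form remainder needed = (-parameter_length) % 4, returning parameter_length + needed when needed is 1, 2 or 3 and raising otherwise (both programs raise exactly when the length is already a multiple of 4).
import Mathlib
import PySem

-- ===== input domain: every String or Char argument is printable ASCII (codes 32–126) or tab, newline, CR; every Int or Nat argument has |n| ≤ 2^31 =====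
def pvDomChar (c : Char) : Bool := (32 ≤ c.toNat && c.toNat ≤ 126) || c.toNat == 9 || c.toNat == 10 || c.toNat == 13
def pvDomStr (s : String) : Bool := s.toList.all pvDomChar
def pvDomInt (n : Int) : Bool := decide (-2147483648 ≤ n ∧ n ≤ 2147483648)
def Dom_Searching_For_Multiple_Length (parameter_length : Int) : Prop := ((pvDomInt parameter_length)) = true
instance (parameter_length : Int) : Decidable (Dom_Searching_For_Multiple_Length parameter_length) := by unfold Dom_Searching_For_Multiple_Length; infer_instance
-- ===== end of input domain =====

-- B replaces A's 1..3 search loop by a closed-form remainder; objective: simpler.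
-- ===== PORT A =====
-- for i in range(1,4): if (x+i)%4==0: break; else raise M2UA_Error(...)
-- state: none = still searching; the `none => 0` arm is the raise (excluded by Pre_)
def Searching_For_Multiple_Length (parameter_length : Int) : Int :=
  match (PySem.List.pyRange 1 4 1).foldl
      (fun acc i =>
        match acc with
        | some m => some m
        | none =>
          if PySem.Int.mod (parameter_length + i) 4 == 0 then some (parameter_length + i)
          else none)
      none with
  | some m => m
  | none => 0  -- unreachable under Pre_ (Python raises M2UA_Error here)

-- ===== PORT B =====
def Searching_For_Multiple_Length_alt (parameter_length : Int) : Int :=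
  let needed := PySem.Int.mod (-parameter_length) 4
  if needed == 1 || needed == 2 || needed == 3 then parameter_length + needed
  else 0  -- raise M2UA_Error (excluded by Pre_)

-- ===== PRECONDITION & SPEC =====
-- A (and B) raise M2UA_Error exactly when parameter_length is already a multiple of 4
def Pre_Searching_For_Multiple_Length (parameter_length : Int) : Prop :=
  PySem.Int.mod parameter_length 4 ≠ 0
instance (parameter_length : Int) : Decidable (Pre_Searching_For_Multiple_Length parameter_length) := by
  unfold Pre_Searching_For_Multiple_Length; infer_instance
def pvWitness_Searching_For_Multiple_Length : Int := 5

def Spec_Searching_For_Multiple_Length (parameter_length : Int) (out : Int) : Prop := out = Searching_For_Multiple_Length_alt parameter_length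
instance (parameter_length : Int) (out : Int) : Decidable (Spec_Searching_For_Multiple_Length parameter_length out) := by unfold Spec_Searching_For_Multiple_Length; infer_instance

-- ===== CLAIM (what is proved, stated in full; the proofs are below) =====
def Claim_equal_Searching_For_Multiple_Length : Prop := ∀ (parameter_length : Int), Dom_Searching_For_Multiple_Length parameter_length → Pre_Searching_For_Multiple_Length parameter_length → Spec_Searching_For_Multiple_Length parameter_length (Searching_For_Multiple_Length parameter_length)

-- ===== LEMMAS AND PROOFS =====

-- ===== VERDICT (by name: the statement is the Claim_ definition above) =====
theorem Searching_For_Multiple_Length_spec : Claim_equal_Searching_For_Multiple_Length := by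
  intro x _ hpre
  unfold Spec_Searching_For_Multiple_Length Searching_For_Multiple_Length Searching_For_Multiple_Length_alt
  unfold Pre_Searching_For_Multiple_Length at hpre
  have hm : ∀ a : Int, PySem.Int.mod a 4 = a % 4 := fun a =>
    PySem.Int.mod_eq_emod_of_pos (by norm_num)
  rw [hm] at hpre
  have h4 : (PySem.List.pyRange 1 4 1) = [1, 2, 3] := rfl
  rw [h4]
  simp only [List.foldl, hm, beq_iff_eq]
  split_ifs <;> simp_all <;> omega
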